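-- pv_equiv track=rewrite | github.com/bashbaug/adventofcode_2021 | day25/go.py | stepright
-- ===== SOURCE A (Python) =====
-- def wrap(state, coord):
--     nr, nc = coord
--     if nr >= len(state):
--         nr = 0
--     if nc >= len(state[nr]):
--         nc = 0
--     return (nr, nc)
--
-- def stepright(state):
--     newstate = [['.' for i in range(len(row))] for row in state]
--     moves = 0
--     for r, row in enumerate(state):
--         for c, s in enumerate(row):
--             if s == 'v':
--                 newstate[r][c] = s
--             elif s == '>':
--                 nr, nc = wrap(state, (r, c+1))
--                 if state[nr][nc] == '.':
--                     newstate[nr][nc] = s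
--                     moves += 1
--                 else:
--                     newstate[r][c] = s
--     return moves, newstate
-- ===== SOURCE B (Python) =====
-- def stepright(state):
--     # Pull/gather pass: each output cell is computed from its own row's
--     # neighbors; no cross-cell writes into a scratch grid.
--     moves = 0
--     newstate = []
--     for row in state:
--         L = len(row)
--         newrow = []
--         for c, s in enumerate(row):
--             if s == 'v':
--                 newrow.append('v')
--             elif s == '>':
--                 if row[(c + 1) % L] == '.':
--                     newrow.append('.')
--                     moves += 1
--                 else:
--                     newrow.append('>')
--             elif s == '.' and row[(c - 1) % L] == '>':
--                 newrow.append('>')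
--             else:
--                 newrow.append('.')
--         newstate.append(newrow)
--     return moves, newstate
-- ===== Notes on version B (the rewrite author's own statement) =====
-- stated objective: alternative
-- what changed: Replaces the push/scatter pass that mutates a pre-allocated '.'-filled scratch grid through a wrap helper with a pull/gather pass that computes every output cell directly from its row neighbors ((c+1)%L and (c-1)%L) and appends it, with no cross-cell writes.
import Mathlib
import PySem

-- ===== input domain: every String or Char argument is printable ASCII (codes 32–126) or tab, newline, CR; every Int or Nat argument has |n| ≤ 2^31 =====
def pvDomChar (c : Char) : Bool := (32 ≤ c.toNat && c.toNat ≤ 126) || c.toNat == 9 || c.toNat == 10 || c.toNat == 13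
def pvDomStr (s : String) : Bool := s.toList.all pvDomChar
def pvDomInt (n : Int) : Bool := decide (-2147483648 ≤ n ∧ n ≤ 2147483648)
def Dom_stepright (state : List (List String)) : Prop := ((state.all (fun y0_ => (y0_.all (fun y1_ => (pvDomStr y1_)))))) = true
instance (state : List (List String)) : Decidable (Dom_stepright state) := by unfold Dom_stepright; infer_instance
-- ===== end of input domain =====

-- B replaces A's push/scatter pass (mutating a '.'-filled scratch grid via a wrap helper)
-- with a pull/gather pass computing each output cell from its row neighbors; objective: alternative decomposition.

-- ===== PORT A =====
-- wrap(state, coord); at stepright's call sites nr is always a valid row index, so state[nr] is read with pyGetD (exact there)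
def pvWrap (state : List (List String)) (coord : Int × Int) : Int × Int :=
  let nr := coord.1
  let nc := coord.2
  let nr := if nr ≥ (state.length : Int) then 0 else nr
  let nc := if nc ≥ (((PySem.List.pyGetD state nr []).length : Int)) then 0 else nc
  (nr, nc)

-- newstate[r][c] = v; indices produced by enumerate/wrap are always in range, so pySetD/pyGetD are exact there
def pvSet2 (m : List (List String)) (r c : Int) (v : String) : List (List String) :=
  PySem.List.pySetD m r (PySem.List.pySetD (PySem.List.pyGetD m r []) c v)

def stepright (state : List (List String)) : Int × List (List String) :=
  let newstate := state.map (fun row => row.map (fun _ => "."))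
  (PySem.List.enumerate state).foldl (fun acc p =>
      (PySem.List.enumerate p.2).foldl (fun acc2 q =>
          if q.2 = "v" then (acc2.1, pvSet2 acc2.2 p.1 q.1 q.2)
          else if q.2 = ">" then
            let w := pvWrap state (p.1, q.1 + 1)
            if PySem.List.pyGetD (PySem.List.pyGetD state w.1 []) w.2 "" = "." then
              (acc2.1 + 1, pvSet2 acc2.2 w.1 w.2 q.2)
            else (acc2.1, pvSet2 acc2.2 p.1 q.1 q.2)
          else acc2)
        acc)
    ((0 : Int), newstate)

-- ===== PORT B =====
-- pull/gather pass; (c+1) % L and (c-1) % L are Python modulo, hence PySem.Int.mod; indices are then in range, so pyGetD is exact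
def stepright_alt (state : List (List String)) : Int × List (List String) :=
  state.foldl (fun acc row =>
    let res := (PySem.List.enumerate row).foldl (fun acc2 q =>
        if q.2 = "v" then (acc2.1, acc2.2 ++ ["v"])
        else if q.2 = ">" then
          if PySem.List.pyGetD row (PySem.Int.mod (q.1 + 1) (row.length : Int)) "" = "." then
            (acc2.1 + 1, acc2.2 ++ ["."])
          else (acc2.1, acc2.2 ++ [">"])
        else if q.2 = "." ∧ PySem.List.pyGetD row (PySem.Int.mod (q.1 - 1) (row.length : Int)) "" = ">" then
          (acc2.1, acc2.2 ++ [">"])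
        else (acc2.1, acc2.2 ++ ["."]))
      (acc.1, ([] : List String))
    (res.1, acc.2 ++ [res.2]))
  ((0 : Int), [])

-- ===== PRECONDITION & SPEC =====
def Spec_stepright (state : List (List String)) (out : Int × List (List String)) : Prop := out = stepright_alt state
instance (state : List (List String)) (out : Int × List (List String)) : Decidable (Spec_stepright state out) := by unfold Spec_stepright; infer_instance

-- ===== CLAIM (what is proved, stated in full; the proofs are below) =====
def Claim_equal_stepright : Prop := ∀ (state : List (List String)), Dom_stepright state → Spec_stepright state (stepright state)

-- ===== LEMMAS AND PROOFS =====

-- the common specification both folds compute: per-cell "pull" value and per-cell move indicator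
def pcell (row : List String) (j : Nat) : String :=
  if row.getD j "" = "v" then "v"
  else if row.getD j "" = ">" then
    if row.getD ((j + 1) % row.length) "" = "." then "." else ">"
  else if row.getD j "" = "." ∧ row.getD ((j + row.length - 1) % row.length) "" = ">" then ">"
  else "."

def pinc (row : List String) (j : Nat) : Int :=
  if row.getD j "" = ">" ∧ row.getD ((j + 1) % row.length) "" = "." then 1 else 0

def Mrow (row : List String) : Int := ((List.range row.length).map (pinc row)).sum
def Nrow (row : List String) : List String := (List.range row.length).map (pcell row)
def pristine (row : List String) : List String := row.map (fun _ => ".")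

-- the one-row write step A performs at column j (after factoring the 2D writes down to row r),
-- and the predicate "step c writes output position j"
def wstep (row : List String) (nr : List String) (j : Nat) : List String :=
  if row.getD j "" = "v" then nr.set j "v"
  else if row.getD j "" = ">" then
    if row.getD ((j + 1) % row.length) "" = "." then nr.set ((j + 1) % row.length) ">"
    else nr.set j ">"
  else nr

def writesB (row : List String) (c j : Nat) : Bool :=
  (decide (j = c) && (decide (row.getD c "" = "v") ||
      (decide (row.getD c "" = ">") && !decide (row.getD ((c + 1) % row.length) "" = ".")))) ||
  (decide (row.getD c "" = ">") && decide (row.getD ((c + 1) % row.length) "" = ".") &&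
      decide (j = (c + 1) % row.length))

-- Nat-mod bookkeeping
lemma succ_mod (j L : Nat) (h : j < L) : (j + 1) % L = if L ≤ j + 1 then 0 else j + 1 := by
  split_ifs with h1
  · have h2 : j + 1 = L := by omega
    rw [h2, Nat.mod_self]
  · exact Nat.mod_eq_of_lt (by omega)

lemma succ_pred (c L : Nat) (h : c < L) : ((c + 1) % L + L - 1) % L = c := by
  rcases Nat.lt_or_ge (c + 1) L with h1 | h1
  · rw [Nat.mod_eq_of_lt h1]
    have h2 : c + 1 + L - 1 = c + L := by omega
    rw [h2, Nat.add_mod_right]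
    exact Nat.mod_eq_of_lt h
  · have h2 : c + 1 = L := by omega
    rw [h2, Nat.mod_self]
    have h3 : 0 + L - 1 = c := by omega
    rw [h3]
    exact Nat.mod_eq_of_lt h

lemma pred_succ (j L : Nat) (h : j < L) : ((j + L - 1) % L + 1) % L = j := by
  by_cases h0 : j = 0
  · subst h0
    have e0 : 0 + L - 1 = L - 1 := by omega
    rw [e0, Nat.mod_eq_of_lt (show L - 1 < L by omega)]
    have e2 : L - 1 + 1 = L := by omega
    rw [e2, Nat.mod_self]
  · have e : (j + L - 1) % L = j - 1 := by
      have h2 : j + L - 1 = (j - 1) + L := by omega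
      rw [h2, Nat.add_mod_right]
      exact Nat.mod_eq_of_lt (by omega)
    rw [e]
    have e2 : j - 1 + 1 = j := by omega
    rw [e2]
    exact Nat.mod_eq_of_lt h

lemma mod_pred (j L : Nat) (h : j < L) :
    PySem.Int.mod ((j : Int) - 1) (L : Int) = ((j + L - 1) % L : Nat) := by
  have hL : (0 : Int) < (L : Int) := by exact_mod_cast (by omega : 0 < L)
  rw [PySem.Int.mod_eq_emod_of_pos hL]
  have h2 : (j : Int) - 1 = ((j + L - 1 : Nat) : Int) - (L : Int) := by omega
  rw [h2, Int.sub_emod_right]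
  norm_cast


-- ===== B side =====

lemma B_inner (row : List String) (m : Int) :
    (PySem.List.enumerate row).foldl (fun acc2 q =>
        if q.2 = "v" then (acc2.1, acc2.2 ++ ["v"])
        else if q.2 = ">" then
          if PySem.List.pyGetD row (PySem.Int.mod (q.1 + 1) (row.length : Int)) "" = "." then
            (acc2.1 + 1, acc2.2 ++ ["."])
          else (acc2.1, acc2.2 ++ [">"])
        else if q.2 = "." ∧ PySem.List.pyGetD row (PySem.Int.mod (q.1 - 1) (row.length : Int)) "" = ">" then
          (acc2.1, acc2.2 ++ [">"])
        else (acc2.1, acc2.2 ++ ["."]))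
      (m, ([] : List String)) = (m + Mrow row, Nrow row) := by
  rw [PySem.List.enumerate_eq_map_pyRange row "", PySem.List.len_eq,
      PySem.List.pyRange_zero_natCast, List.foldl_map, List.foldl_map]
  rw [PySem.List.foldl_congr_mem' _ _
      (fun acc2 (j : Nat) => (acc2.1 + pinc row j, acc2.2 ++ [pcell row j])) _ ?hc]
  case hc =>
    intro j hj acc
    have hjL : j < row.length := List.mem_range.mp hj
    have e1 : ((j : Int) + 1) = ((j + 1 : Nat) : Int) := by omega
    simp only [e1, PySem.Int.mod_natCast, mod_pred j row.length hjL,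
      PySem.List.pyGetD_natCast, pinc, pcell]
    split_ifs <;> simp_all
  rw [PySem.List.foldl_prod_mk (f := fun a j => a + pinc row j)
      (g := fun l j => l ++ [pcell row j])]
  rw [PySem.List.foldl_add, PySem.List.foldl_append_singleton_eq_map]
  simp [Mrow, Nrow]

lemma B_eq (state : List (List String)) :
    stepright_alt state = ((state.map Mrow).sum, state.map Nrow) := by
  unfold stepright_alt
  rw [PySem.List.foldl_congr_mem' _ _
      (fun acc row => (acc.1 + Mrow row, acc.2 ++ [Nrow row])) _ ?hc]
  case hc =>
    intro row _ acc
    simp only [B_inner]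
  rw [PySem.List.foldl_prod_mk (f := fun a row => a + Mrow row)
      (g := fun l row => l ++ [Nrow row])]
  rw [PySem.List.foldl_add, PySem.List.foldl_append_singleton_eq_map]
  simp


-- ===== A side =====

lemma length_wstep (row nr : List String) (j : Nat) : (wstep row nr j).length = nr.length := by
  unfold wstep; split_ifs <;> simp

lemma wstep_getElem? (row nr : List String) (c j : Nat) (hc : c < row.length)
    (hj : j < row.length) (hlen : nr.length = row.length) :
    (wstep row nr c)[j]? = if writesB row c j then some (pcell row j) else nr[j]? := by
  have hL : 0 < row.length := by omega
  have ht : (c + 1) % row.length < row.length := Nat.mod_lt _ hL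
  unfold wstep
  simp only [List.getD_eq_getElem?_getD]
  by_cases h1 : row[c]?.getD "" = "v"
  · rw [if_pos h1]
    by_cases hjc : j = c
    · subst hjc
      have hw : writesB row j j = true := by simp [writesB, h1]
      have hp : pcell row j = "v" := by simp [pcell, h1]
      rw [List.getElem?_set_self (by omega)]
      simp [hw, hp]
    · have hw : writesB row c j = false := by simp [writesB, h1, hjc]
      rw [List.getElem?_set_ne (fun h => hjc h.symm)]
      simp [hw]
  · rw [if_neg h1]
    by_cases h2 : row[c]?.getD "" = ">"
    · rw [if_pos h2]
      by_cases h3 : row[(c + 1) % row.length]?.getD "" = "."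
      · rw [if_pos h3]
        by_cases hjt : j = (c + 1) % row.length
        · subst hjt
          have hw : writesB row c ((c + 1) % row.length) = true := by simp [writesB, h2, h3]
          have hp : pcell row ((c + 1) % row.length) = ">" := by
            simp [pcell, h3, succ_pred c row.length hc, h2]
          rw [List.getElem?_set_self (by omega)]
          simp [hw, hp]
        · have hw : writesB row c j = false := by simp [writesB, h2, h3, hjt]
          rw [List.getElem?_set_ne (fun h => hjt h.symm)]
          simp [hw]
      · rw [if_neg h3]
        by_cases hjc : j = c
        · subst hjc
          have hw : writesB row j j = true := by simp [writesB, h2, h3]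
          have hp : pcell row j = ">" := by simp [pcell, h2, h3]
          rw [List.getElem?_set_self (by omega)]
          simp [hw, hp]
        · have hw : writesB row c j = false := by simp [writesB, h2, h3, hjc]
          rw [List.getElem?_set_ne (fun h => hjc h.symm)]
          simp [hw]
    · rw [if_neg h2]
      have hw : writesB row c j = false := by simp [writesB, h1, h2]
      simp [hw]

lemma foldW (row : List String) : ∀ (l : List Nat) (nr : List String),
    (∀ c ∈ l, c < row.length) → nr.length = row.length → ∀ j, j < row.length →
    (l.foldl (wstep row) nr)[j]? =
      if l.any (fun c => writesB row c j) then some (pcell row j) else nr[j]? := by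
  intro l
  induction l with
  | nil => intro nr _ _ j _; simp
  | cons c l ih =>
    intro nr hcs hlen j hj
    simp only [List.foldl_cons, List.any_cons]
    rw [ih (wstep row nr c) (fun c' hc' => hcs c' (List.mem_cons_of_mem _ hc'))
        (by rw [length_wstep]; exact hlen) j hj]
    rw [wstep_getElem? row nr c j (hcs c (List.mem_cons_self)) hj hlen]
    by_cases hw : writesB row c j = true <;>
      by_cases ha : (l.any fun c => writesB row c j) = true <;> simp [hw, ha]

lemma no_writer (row : List String) (j : Nat) (hj : j < row.length)
    (h : (List.range row.length).any (fun c => writesB row c j) = false) : pcell row j = "." := by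
  have hL : 0 < row.length := by omega
  have h' : ∀ c, c < row.length → writesB row c j = false := by
    intro c hc
    have := List.any_eq_false.mp h
    exact Bool.eq_false_iff.mpr (fun hb => (this c (List.mem_range.mpr hc)) hb)
  unfold pcell
  simp only [List.getD_eq_getElem?_getD]
  split_ifs with h1 h2 h3 h4
  · exfalso
    have := h' j hj
    simp [writesB, h1] at this
  · rfl
  · exfalso
    have := h' j hj
    simp [writesB, h2, h3] at this
  · exfalso
    have hc : (j + row.length - 1) % row.length < row.length := Nat.mod_lt _ hL
    have := h' _ hc
    simp [writesB, h4.2, pred_succ j row.length hj, h4.1] at this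
  · rfl

lemma length_foldW (row : List String) (l : List Nat) (nr : List String) :
    (l.foldl (wstep row) nr).length = nr.length := by
  induction l generalizing nr with
  | nil => rfl
  | cons c l ih => simp [List.foldl_cons, ih, length_wstep]

lemma A_rowfold (row : List String) :
    (List.range row.length).foldl (wstep row) (pristine row) = Nrow row := by
  apply List.ext_getElem?
  intro j
  by_cases hj : j < row.length
  · rw [foldW row (List.range row.length) (pristine row) (fun c hc => List.mem_range.mp hc)
        (by simp [pristine]) j hj]
    have hN : (Nrow row)[j]? = some (pcell row j) := by simp [Nrow, hj]
    rw [hN]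
    cases ha : (List.range row.length).any (fun c => writesB row c j)
    · simp [no_writer row j hj ha, pristine, hj]
    · simp
  · have e1 : ((List.range row.length).foldl (wstep row) (pristine row))[j]? = none := by
      rw [List.getElem?_eq_none_iff]
      rw [length_foldW]
      simp [pristine]; omega
    have e2 : (Nrow row)[j]? = none := by
      rw [List.getElem?_eq_none_iff]
      simp [Nrow]; omega
    rw [e1, e2]

lemma set_getD_self (N : List (List String)) (k : Nat) : N.set k (N.getD k []) = N := by
  induction N generalizing k with
  | nil => rfl
  | cons x xs ih =>
    simp only [List.getD_eq_getElem?_getD] at ih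
    cases k <;> simp [ih]

lemma set_getD_self' (N : List (List String)) (k : Nat) : N.set k (N[k]?.getD []) = N := by
  simpa [List.getD_eq_getElem?_getD] using set_getD_self N k

lemma factorRow (row : List String) (k : Nat) : ∀ (l : List Nat) (N : List (List String)),
    k < N.length →
    l.foldl (fun N2 j => N2.set k (wstep row (N2.getD k []) j)) N
      = N.set k (l.foldl (wstep row) (N.getD k [])) := by
  intro l
  induction l with
  | nil => intro N _; exact (set_getD_self N k).symm
  | cons j l ih =>
    intro N hk
    simp only [List.foldl_cons]
    rw [ih _ (by simp [hk])]
    rw [List.set_set]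
    congr 1
    congr 1
    simp only [List.getD_eq_getElem?_getD, List.getElem?_set_self hk]
    rfl

lemma A_inner (state : List (List String)) (k : Nat) (row : List String)
    (hk : k < state.length) (hrow : state.getD k [] = row) (m : Int) (N : List (List String))
    (hk2 : k < N.length) :
    (PySem.List.enumerate row).foldl (fun acc2 q =>
        if q.2 = "v" then (acc2.1, pvSet2 acc2.2 (k : Int) q.1 q.2)
        else if q.2 = ">" then
          let w := pvWrap state ((k : Int), q.1 + 1)
          if PySem.List.pyGetD (PySem.List.pyGetD state w.1 []) w.2 "" = "." then
            (acc2.1 + 1, pvSet2 acc2.2 w.1 w.2 q.2)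
          else (acc2.1, pvSet2 acc2.2 (k : Int) q.1 q.2)
        else acc2)
      (m, N)
    = (m + Mrow row, N.set k ((List.range row.length).foldl (wstep row) (N.getD k []))) := by
  rw [PySem.List.enumerate_eq_map_pyRange row "", PySem.List.len_eq,
      PySem.List.pyRange_zero_natCast, List.foldl_map, List.foldl_map]
  rw [PySem.List.foldl_congr_mem' _ _
      (fun acc (j : Nat) => (acc.1 + pinc row j, acc.2.set k (wstep row (acc.2.getD k []) j))) _ ?hc]
  case hc =>
    intro j hj acc
    have hjL : j < row.length := List.mem_range.mp hj
    have hkI : ¬ ((k : Int) ≥ (state.length : Int)) := by exact_mod_cast Nat.not_le.mpr hk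
    have e1 : ((j : Int) + 1) = ((j + 1 : Nat) : Int) := by omega
    have e2 : (if ((j + 1 : Nat) : Int) ≥ ((row.length : Nat) : Int) then (0 : Int) else ((j + 1 : Nat) : Int))
        = (((j + 1) % row.length : Nat) : Int) := by
      rw [succ_mod j row.length hjL]
      split_ifs with hcond hc2 hc3
      · rfl
      · exfalso; apply hc2; exact_mod_cast hcond
      · exfalso; apply hcond; exact_mod_cast hc3
      · rfl
    simp only [pvWrap, pvSet2, e1]
    simp only [if_neg hkI, PySem.List.pyGetD_natCast, hrow, e2, PySem.List.pySetD_natCast]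
    simp only [pinc, wstep]
    split_ifs <;> simp_all [set_getD_self']
  have hp := PySem.List.foldl_prod_mk (f := fun (a : Int) (e : Nat) => a + pinc row e)
      (g := fun (N2 : List (List String)) (e : Nat) => N2.set k (wstep row (N2.getD k []) e))
      (l := List.range row.length) (a := m) (b := N)
  exact hp.trans (by rw [PySem.List.foldl_add, factorRow row k _ N hk2]; rfl)

lemma foldl_set_getElem? (F : Nat → List String) : ∀ (l : List Nat) (N : List (List String)) (j : Nat),
    (l.foldl (fun N2 k => N2.set k (F k)) N)[j]? =
      if j ∈ l ∧ j < N.length then some (F j) else N[j]? := by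
  intro l
  induction l with
  | nil => intro N j; simp
  | cons c l ih =>
    intro N j
    simp only [List.foldl_cons]
    rw [ih, List.length_set]
    have hset : (N.set c (F c))[j]? = if c = j ∧ j < N.length then some (F c) else N[j]? := by
      rw [List.getElem?_set]
      by_cases h1 : c = j
      · subst h1
        by_cases h2 : c < N.length
        · simp [h2]
        · simp [h2]
      · simp [h1]
  -- mark
    by_cases hlen : j < N.length
    · by_cases h1 : j ∈ l
      · simp [h1, hlen]
      · by_cases hjc : j = c
        · subst hjc
          simp [h1, hlen]
        · simp [h1, hlen, hjc, Ne.symm hjc]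
    · simp only [hlen, and_false, if_false]
      rw [hset]
      simp [hlen]

lemma A_outer (state : List (List String)) : ∀ (l : List Nat) (m : Int) (N : List (List String)),
    (∀ k ∈ l, k < state.length) → N.length = state.length → l.Nodup →
    (∀ k ∈ l, N.getD k [] = pristine (state.getD k [])) →
    l.foldl (fun acc k =>
        (PySem.List.enumerate (state.getD k [])).foldl (fun acc2 q =>
          if q.2 = "v" then (acc2.1, pvSet2 acc2.2 (k : Int) q.1 q.2)
          else if q.2 = ">" then
            let w := pvWrap state ((k : Int), q.1 + 1)
            if PySem.List.pyGetD (PySem.List.pyGetD state w.1 []) w.2 "" = "." then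
              (acc2.1 + 1, pvSet2 acc2.2 w.1 w.2 q.2)
            else (acc2.1, pvSet2 acc2.2 (k : Int) q.1 q.2)
          else acc2) acc)
      (m, N)
    = (m + (l.map (fun k => Mrow (state.getD k []))).sum,
       l.foldl (fun N2 k => N2.set k (Nrow (state.getD k []))) N) := by
  intro l
  induction l with
  | nil => intro m N _ _ _ _; simp
  | cons k l ih =>
    intro m N hks hlen hnd hpr
    have hk : k < state.length := hks k List.mem_cons_self
    have hk2 : k < N.length := by omega
    simp only [List.foldl_cons]
    rw [A_inner state k (state.getD k []) hk rfl m N hk2]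
    rw [hpr k List.mem_cons_self]
    have hrowfold : (List.range (state.getD k []).length).foldl (wstep (state.getD k []))
        (pristine (state.getD k [])) = Nrow (state.getD k []) := A_rowfold _
    rw [hrowfold]
    rw [ih (m + Mrow (state.getD k [])) (N.set k (Nrow (state.getD k [])))
        (fun k' hk' => hks k' (List.mem_cons_of_mem _ hk'))
        (by rw [List.length_set]; exact hlen)
        (List.Nodup.of_cons hnd)
        ?hpr']
    case hpr' =>
      intro k' hk'
      have hne : k ≠ k' := by
        intro he; subst he; exact (List.nodup_cons.mp hnd).1 hk'
      rw [List.getD_eq_getElem?_getD, List.getElem?_set_ne hne, ← List.getD_eq_getElem?_getD]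
      exact hpr k' (List.mem_cons_of_mem _ hk')
    simp only [List.map_cons, List.sum_cons]
    rw [add_assoc]

lemma map_range_getD {α β : Type} (f : α → β) (l : List α) (d : α) :
    (List.range l.length).map (fun k => f (l.getD k d)) = l.map f := by
  apply List.ext_getElem (by simp)
  intro i h1 h2
  simp [List.getD_eq_getElem?_getD, List.getElem?_eq_getElem (by simpa using h1)]

lemma A_eq (state : List (List String)) :
    stepright state = ((state.map Mrow).sum, state.map Nrow) := by
  unfold stepright
  rw [PySem.List.enumerate_eq_map_pyRange state [], PySem.List.len_eq,
      PySem.List.pyRange_zero_natCast, List.foldl_map, List.foldl_map]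
  rw [PySem.List.foldl_congr_mem' _ _
      (fun acc (k : Nat) =>
        (PySem.List.enumerate (state.getD k [])).foldl (fun acc2 q =>
          if q.2 = "v" then (acc2.1, pvSet2 acc2.2 (k : Int) q.1 q.2)
          else if q.2 = ">" then
            let w := pvWrap state ((k : Int), q.1 + 1)
            if PySem.List.pyGetD (PySem.List.pyGetD state w.1 []) w.2 "" = "." then
              (acc2.1 + 1, pvSet2 acc2.2 w.1 w.2 q.2)
            else (acc2.1, pvSet2 acc2.2 (k : Int) q.1 q.2)
          else acc2) acc) _ ?hc]
  case hc =>
    intro k hk acc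
    simp only [PySem.List.pyGetD_natCast]
  rw [A_outer state (List.range state.length) 0 (state.map (fun row => row.map (fun _ => ".")))
      (fun k hk => List.mem_range.mp hk) (by simp) List.nodup_range ?hpr]
  case hpr =>
    intro k hk
    have hkl : k < state.length := List.mem_range.mp hk
    simp only [List.getD_eq_getElem?_getD, List.getElem?_map,
      List.getElem?_eq_getElem hkl, pristine]
    rfl
  rw [zero_add]
  congr 1
  · rw [show (List.range state.length).map (fun k => Mrow (state.getD k [])) = state.map Mrow from
      map_range_getD Mrow state []]
  · apply List.ext_getElem?
    intro j
    rw [foldl_set_getElem? (fun k => Nrow (state.getD k [])) (List.range state.length) _ j]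
    by_cases hj : j < state.length
    · simp [hj, List.getD_eq_getElem?_getD]
    · simp only [List.mem_range, hj, false_and, if_false]
      rw [List.getElem?_eq_none (by simpa using (by omega : state.length ≤ j)),
          List.getElem?_eq_none (by simpa using (by omega : state.length ≤ j))]

-- ===== VERDICT (by name: the statement is the Claim_ definition above) =====
theorem stepright_spec : Claim_equal_stepright := by
  intro state _
  unfold Spec_stepright
  rw [A_eq, B_eq]
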